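-- pv_equiv track=rewrite | github.com/algo-gotcha/luna-algo-study | bkd/0x03/1475.py | solution
-- ===== SOURCE A (Python) =====
-- def solution(room_number):
--     room_number = str(room_number)
--     hash = {}
--     for number in room_number:
--         if number != '9' and number != '6':
--             if hash.get(number, 0) == 0:
--                 hash[number] = 1
--             else:
--                 hash[number] += 1
--
--     sixnine = room_number.count('6') + room_number.count('9')
--     if sixnine % 2 != 0:
--         sixnine = sixnine // 2 + 1
--     else:
--         sixnine //= 2
--     if len(hash.values()) > 0:
--         max_num = max(hash.values())
--         if sixnine < max_num:
--             return max_num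
--     return sixnine
-- ===== SOURCE B (Python) =====
-- def solution(room_number):
--     s = str(room_number)
--     counts = {}
--     for ch in s:
--         counts[ch] = counts.get(ch, 0) + 1
--     six_nine = counts.pop('6', 0) + counts.pop('9', 0)
--     # search for the smallest number of plate sets k that is feasible:
--     # every other character is available k times, and 6/9 jointly 2k times
--     for k in range(len(s) + 1):
--         if six_nine <= 2 * k and all(v <= k for v in counts.values()):
--             return k
--     return len(s)
-- ===== Notes on version B (the rewrite author's own statement) =====
-- stated objective: alternative
-- what changed: A computes the answer directly as a maximum (dict of counts, a recount of sixes and nines with an odd/even parity branch, then a comparison of the dict max against the halved six/nine total); B instead treats it as a search problem: it builds the counts once, pops the six/nine total, and scans candidate plate-set counts k in increasing order, returning the first k that is feasible (every other character occurs at most k times and the six/nine total at most twice k).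
import Mathlib
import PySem

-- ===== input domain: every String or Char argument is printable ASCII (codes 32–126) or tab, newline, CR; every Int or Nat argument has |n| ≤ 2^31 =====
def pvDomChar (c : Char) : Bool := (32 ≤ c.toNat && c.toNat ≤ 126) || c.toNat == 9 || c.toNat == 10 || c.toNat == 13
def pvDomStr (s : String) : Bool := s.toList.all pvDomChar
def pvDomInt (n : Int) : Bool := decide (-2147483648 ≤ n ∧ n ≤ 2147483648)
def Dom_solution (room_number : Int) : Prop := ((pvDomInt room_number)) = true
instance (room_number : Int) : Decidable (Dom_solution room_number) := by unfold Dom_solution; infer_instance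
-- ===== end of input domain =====

-- B replaces A's direct max computation (dict of counts, 6/9 recount with an odd/even
-- branch, comparison against the dict max) by a search: it scans k = 0, 1, 2, ... and
-- returns the first k for which k plate sets suffice (objective: alternative).

-- ===== PORT A =====
def solution (room_number : Int) : Int :=
  let s : List Char := PySem.Int.toChars room_number
  let hash : PySem.Dict Char Int := s.foldl (fun h c =>
      if c ≠ '9' ∧ c ≠ '6' then
        (if h.getD c 0 == 0 then h.insert c 1 else h.insert c (h.getD c 0 + 1))
      else h) PySem.Dict.empty
  let sixnine0 : Int := (PySem.Chars.count s ['6'] : Int) + (PySem.Chars.count s ['9'] : Int)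
  let sixnine : Int :=
    if PySem.Int.mod sixnine0 2 ≠ 0 then PySem.Int.floordiv sixnine0 2 + 1
    else PySem.Int.floordiv sixnine0 2
  if hash.values.length > 0 then
    match PySem.List.max? hash.values (fun x => x) with
    | some max_num => if sixnine < max_num then max_num else sixnine
    | none => sixnine
  else sixnine

-- ===== PORT B =====
def solution_alt (room_number : Int) : Int :=
  let s : List Char := PySem.Int.toChars room_number
  let counts : PySem.Dict Char Int :=
    s.foldl (fun d ch => d.insert ch (d.getD ch 0 + 1)) PySem.Dict.empty
  -- counts.pop('6', 0) and counts.pop('9', 0)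
  let six : Int := counts.getD '6' 0
  let counts := counts.erase '6'
  let nine : Int := counts.getD '9' 0
  let counts := counts.erase '9'
  let six_nine : Int := six + nine
  -- first k in range(len(s) + 1) for which k plate sets are feasible
  match (PySem.List.pyRange 0 ((s.length : Int) + 1) 1).find?
      (fun k => decide (six_nine ≤ 2 * k) && counts.values.all (fun v => decide (v ≤ k))) with
  | some k => k
  | none => (s.length : Int)   -- Source B's trailing 'return len(s)' (never reached)

-- ===== PRECONDITION & SPEC =====
def Spec_solution (room_number : Int) (out : Int) : Prop := out = solution_alt room_number
instance (room_number : Int) (out : Int) : Decidable (Spec_solution room_number out) := by unfold Spec_solution; infer_instance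

-- ===== CLAIM (what is proved, stated in full; the proofs are below) =====
def Claim_equal_solution : Prop := ∀ (room_number : Int), Dom_solution room_number → Spec_solution room_number (solution room_number)

-- ===== LEMMAS AND PROOFS =====

-- the shared "not a six and not a nine" filter
def pvKeep (c : Char) : Bool := decide (¬ c = '9' ∧ ¬ c = '6')

-- Python str.count with a single-character needle is List.count
lemma chars_count_go_cons (c hd : Char) (t : List Char) (n acc : Nat) :
    PySem.Chars.count.go [c] (n+1) (hd :: t) acc
      = (if c == hd then PySem.Chars.count.go [c] n t (acc+1)
         else PySem.Chars.count.go [c] n t acc) := by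
  rw [PySem.Chars.count.go]
  simp [List.isPrefixOf]

lemma chars_count_go_singleton (c : Char) (l : List Char) : ∀ (fuel acc : Nat),
    l.length ≤ fuel → PySem.Chars.count.go [c] fuel l acc = acc + l.count c := by
  induction l with
  | nil =>
      intro fuel acc _
      cases fuel <;> simp [PySem.Chars.count.go]
  | cons hd t ih =>
      intro fuel acc h
      cases fuel with
      | zero => simp at h
      | succ n =>
          rw [chars_count_go_cons]
          simp only [List.length_cons, Nat.add_le_add_iff_right] at h
          by_cases hc : c = hd
          · rw [if_pos (by simp [hc]), ih n (acc+1) h]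
            simp only [hc, List.count_cons_self]
            omega
          · rw [if_neg (by simp [hc]), ih n acc h]
            rw [List.count_cons_of_ne (Ne.symm hc)]

lemma chars_count_singleton (c : Char) (l : List Char) :
    PySem.Chars.count l [c] = l.count c := by
  unfold PySem.Chars.count
  simp [chars_count_go_singleton c l l.length 0 le_rfl]

-- A's dict loop is Counter of the filtered character list
lemma hash_eq_counter (s : List Char) :
    s.foldl (fun h c =>
      if c ≠ '9' ∧ c ≠ '6' then
        (if h.getD c 0 == 0 then h.insert c 1 else h.insert c (h.getD c 0 + 1))
      else h) PySem.Dict.empty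
    = PySem.Dict.counter (s.filter pvKeep) := by
  rw [← PySem.Dict.foldl_insert_getD_add_one_eq_counter, List.foldl_filter]
  apply PySem.List.foldl_congr_mem
  intro acc x _
  by_cases hx : (¬ x = '9' ∧ ¬ x = '6')
  · by_cases h0 : acc.getD x 0 = 0 <;> simp [pvKeep, hx, h0]
  · simp [pvKeep, hx]

-- ceiling-halving in one step
lemma merge_eq (a b : Nat) :
    (if PySem.Int.mod ((a : Int) + (b : Int)) 2 ≠ 0
     then PySem.Int.floordiv ((a : Int) + (b : Int)) 2 + 1
     else PySem.Int.floordiv ((a : Int) + (b : Int)) 2)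
    = PySem.Int.floordiv ((a : Int) + (b : Int) + 1) 2 := by
  rw [PySem.Int.mod_eq_emod_of_pos (by norm_num), PySem.Int.floordiv_eq_ediv_of_pos (by norm_num),
      PySem.Int.floordiv_eq_ediv_of_pos (a := (a : Int) + (b : Int) + 1) (by norm_num)]
  split_ifs with h <;> omega

lemma foldl_max_max (l : List Int) (a : Int) :
    ∀ b : Int, l.foldl max (max a b) = max a (l.foldl max b) := by
  induction l with
  | nil => intro b; rfl
  | cons x t ih =>
      intro b
      simp only [List.foldl_cons, max_assoc, ih]

lemma ite_lt_max (a b : Int) : (if a < b then b else a) = max a b := by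
  rcases max_cases a b with ⟨h1, h2⟩ | ⟨h1, h2⟩ <;> split_ifs with h <;> omega

-- the character counts A's comparison ranges over, as an explicit list
def pvVals (s : List Char) : List Int :=
  ((PySem.Set.ofList s).filter pvKeep).map (fun k => ((s.count k : Int)))

lemma add_filter (p : Char → Bool) (acc : List Char) (x : Char) (px : p x = true) :
    PySem.Set.add (acc.filter p) x = (PySem.Set.add acc x).filter p := by
  by_cases hm : x ∈ acc
  · rw [PySem.Set.add_of_mem hm, PySem.Set.add_of_mem (by simp [List.mem_filter, hm, px])]
  · rw [PySem.Set.add_of_not_mem hm, PySem.Set.add_of_not_mem (by simp [List.mem_filter, hm])]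
    simp [List.filter_append, px]

lemma add_filter_neg (p : Char → Bool) (acc : List Char) (x : Char) (px : p x = false) :
    (PySem.Set.add acc x).filter p = acc.filter p := by
  by_cases hm : x ∈ acc
  · rw [PySem.Set.add_of_mem hm]
  · rw [PySem.Set.add_of_not_mem hm]
    simp [List.filter_append, px]

lemma foldl_add_filter (p : Char → Bool) : ∀ (s acc : List Char),
    (s.filter p).foldl PySem.Set.add (acc.filter p) = (s.foldl PySem.Set.add acc).filter p := by
  intro s
  induction s with
  | nil => intro acc; rfl
  | cons x t ih =>
      intro acc
      by_cases px : p x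
      · rw [List.filter_cons_of_pos px]
        simp only [List.foldl_cons]
        rw [add_filter p acc x px, ih (PySem.Set.add acc x)]
      · rw [List.filter_cons_of_neg (by simp [px])]
        simp only [List.foldl_cons]
        rw [← add_filter_neg p acc x (by simp [px]), ih (PySem.Set.add acc x)]

-- dedup commutes with filter
lemma ofList_filter (p : Char → Bool) (s : List Char) :
    PySem.Set.ofList (s.filter p) = (PySem.Set.ofList s).filter p := by
  have h := foldl_add_filter p s []
  simpa [PySem.Set.ofList, PySem.Set.empty_eq] using h

-- A's dict values are exactly pvVals
lemma counter_values_eq_pvVals (s : List Char) :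
    (PySem.Dict.counter (s.filter pvKeep)).values = pvVals s := by
  simp only [PySem.Dict.values, PySem.Dict.items_counter, List.map_map, ofList_filter, pvVals]
  apply List.map_congr_left
  intro k hk
  have hkp : pvKeep k = true := (List.mem_filter.mp hk).2
  simp [List.count_filter hkp]

-- A's tail computes the running max of pvVals started at M
lemma A_tail_eq_foldl (s : List Char) (M : Int) :
    (if ((PySem.Dict.counter (s.filter pvKeep)).values).length > 0 then
       match PySem.List.max? (PySem.Dict.counter (s.filter pvKeep)).values (fun x => x) with
       | some max_num => if M < max_num then max_num else M
       | none => M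
     else M)
    = (pvVals s).foldl max M := by
  rw [counter_values_eq_pvVals]
  cases hL : pvVals s with
  | nil => simp
  | cons x t =>
      simp only [List.length_cons, gt_iff_lt, Nat.succ_pos, if_true,
        PySem.List.max?_id_cons, List.foldl_cons]
      rw [ite_lt_max, ← foldl_max_max]

-- B's dict after the two pops: '6'/'9' values and the remaining values
lemma find?_filter_of_imp {α : Type} (pred keep : α → Bool)
    (himp : ∀ x, pred x = true → keep x = true) : ∀ (l : List α),
    (l.filter keep).find? pred = l.find? pred := by
  intro l
  induction l with
  | nil => rfl
  | cons h t ih =>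
      by_cases hk : keep h
      · rw [List.filter_cons_of_pos hk]
        by_cases hp : pred h
        · rw [List.find?_cons_of_pos hp, List.find?_cons_of_pos hp]
        · rw [List.find?_cons_of_neg (by simp [hp]), List.find?_cons_of_neg (by simp [hp]), ih]
      · have hp : pred h = false := by
          by_contra hc
          exact hk (himp h (by simpa using hc))
        rw [List.filter_cons_of_neg (by simp [hk]), List.find?_cons_of_neg (by simp [hp]), ih]

lemma getD_erase_of_ne (d : PySem.Dict Char Int) (k k' : Char) (h : k' ≠ k) :
    (d.erase k).getD k' 0 = d.getD k' 0 := by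
  simp only [PySem.Dict.getD, PySem.Dict.get?, PySem.Dict.erase]
  rw [find?_filter_of_imp (fun p => p.1 == k') (fun p => !(p.1 == k))
    (by intro p hp; simp only [beq_iff_eq] at hp; simp [hp, h]) d.items]

lemma erased_values_eq_pvVals (s : List Char) :
    (((PySem.Dict.counter s).erase '6').erase '9').values = pvVals s := by
  simp only [PySem.Dict.values, PySem.Dict.erase, PySem.Dict.items_counter,
    List.filter_map, List.filter_filter, List.map_map, pvVals]
  rw [List.filter_congr (q := pvKeep)
    (by intro k _
        simp only [Function.comp]
        by_cases h6 : k = '6' <;> by_cases h9 : k = '9' <;> simp [pvKeep, h6, h9])]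
  simp [Function.comp]

-- a running max is ≤ k iff the seed and every element are
lemma foldl_max_le (l : List Int) : ∀ (b k : Int),
    l.foldl max b ≤ k ↔ b ≤ k ∧ ∀ v ∈ l, v ≤ k := by
  induction l with
  | nil => intro b k; simp
  | cons x t ih =>
      intro b k
      simp only [List.foldl_cons, ih (max b x) k, max_le_iff, List.mem_cons]
      constructor
      · rintro ⟨⟨hb, hx⟩, ht⟩
        exact ⟨hb, fun v hv => by rcases hv with rfl | hv; exact hx; exact ht v hv⟩
      · rintro ⟨hb, hall⟩
        exact ⟨⟨hb, hall x (Or.inl rfl)⟩, fun v hv => hall v (Or.inr hv)⟩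

lemma le_foldl_max_seed (l : List Int) : ∀ b : Int, b ≤ l.foldl max b := by
  induction l with
  | nil => intro b; simp
  | cons x t ih =>
      intro b
      exact le_trans (le_max_left b x) (ih (max b x))

-- find? over range(a, b) of a monotone-threshold predicate returns the threshold
lemma find?_pyRange_threshold (pred : Int → Bool) (M : Int)
    (hM : ∀ k, pred k = true ↔ M ≤ k) : ∀ (n : Nat) (a b : Int), (b - a).toNat = n →
    a ≤ M → M < b → (PySem.List.pyRange a b 1).find? pred = some M := by
  intro n
  induction n with
  | zero =>
      intro a b hn ha hb
      omega
  | succ m ih =>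
      intro a b hn ha hb
      rw [PySem.List.pyRange_one_cons (by omega)]
      by_cases haM : a = M
      · rw [List.find?_cons_of_pos (by rw [hM]; omega), haM]
      · rw [List.find?_cons_of_neg (by simp [hM]; omega)]
        exact ih (a + 1) b (by omega) (by omega) hb

-- each character count is bounded by the string length
lemma pvVals_le_len (s : List Char) : ∀ v ∈ pvVals s, v ≤ (s.length : Int) := by
  intro v hv
  rcases List.mem_map.mp hv with ⟨k, _, rfl⟩
  exact_mod_cast List.count_le_length

-- the bridge: B's search finds exactly A's max
lemma search_eq_max (s : List Char) :
    (PySem.List.pyRange 0 ((s.length : Int) + 1) 1).find?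
      (fun k => decide (((s.count '6' : Int) + (s.count '9' : Int)) ≤ 2 * k)
        && (pvVals s).all (fun v => decide (v ≤ k)))
    = some ((pvVals s).foldl max
        (PySem.Int.floordiv ((s.count '6' : Int) + (s.count '9' : Int) + 1) 2)) := by
  set sn : Int := (s.count '6' : Int) + (s.count '9' : Int) with hsn
  have hsn0 : 0 ≤ sn := by positivity
  set M0 : Int := PySem.Int.floordiv (sn + 1) 2 with hM0
  have hfloor : M0 = (sn + 1) / 2 := by
    rw [hM0, PySem.Int.floordiv_eq_ediv_of_pos (by norm_num)]
  set M : Int := (pvVals s).foldl max M0 with hM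
  have hthr : ∀ k, (decide (sn ≤ 2 * k) && (pvVals s).all (fun v => decide (v ≤ k))) = true
      ↔ M ≤ k := by
    intro k
    rw [hM, foldl_max_le]
    simp only [Bool.and_eq_true, decide_eq_true_eq, List.all_eq_true, decide_eq_true_eq]
    constructor
    · rintro ⟨h1, h2⟩
      exact ⟨by rw [hfloor]; omega, h2⟩
    · rintro ⟨h1, h2⟩
      rw [hfloor] at h1
      exact ⟨by omega, h2⟩
  apply find?_pyRange_threshold _ M hthr (((s.length : Int) + 1) - 0).toNat _ _ rfl
  · -- 0 ≤ M
    have := le_foldl_max_seed (pvVals s) M0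
    have : 0 ≤ M0 := by rw [hfloor]; omega
    calc (0 : Int) ≤ M0 := this
      _ ≤ M := le_foldl_max_seed (pvVals s) M0
  · -- M < len + 1
    have h6 : (s.count '6' : Int) ≤ (s.length : Int) := by exact_mod_cast List.count_le_length
    have h9 : (s.count '9' : Int) ≤ (s.length : Int) := by exact_mod_cast List.count_le_length
    have : M ≤ (s.length : Int) := by
      rw [hM, foldl_max_le]
      exact ⟨by rw [hfloor]; omega, pvVals_le_len s⟩
    omega

-- ===== VERDICT (by name: the statement is the Claim_ definition above) =====
theorem solution_spec : Claim_equal_solution := by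
  intro n _
  unfold Spec_solution solution solution_alt
  simp only [chars_count_singleton, hash_eq_counter,
    PySem.Dict.foldl_insert_getD_add_one_eq_counter, PySem.Dict.getD_counter,
    getD_erase_of_ne _ '6' '9' (by decide), erased_values_eq_pvVals]
  rw [merge_eq, A_tail_eq_foldl, search_eq_max]
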